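-- pv_equiv track=rewrite | github.com/HyacineLove/fly-print-edge | printer_windows.py | _get_job_status_text
-- ===== SOURCE A (Python) =====
-- def _get_job_status_text(status: int) -> str:
--     """获取任务状态文本"""
--     status_map = {
--         0x00000001: "暂停",
--         0x00000002: "错误",
--         0x00000004: "正在删除",
--         0x00000008: "正在后台处理",
--         0x00000010: "正在打印",
--         0x00000020: "离线",
--         0x00000040: "缺纸",
--         0x00000080: "已打印",
--         0x00000100: "已删除",
--         0x00000200: "被阻止",
--         0x00000400: "用户干预",
--         0x00000800: "重新启动"
--     }
--
--     for flag, text in status_map.items():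
--         if status & flag:
--             return text
--     return "未知"
-- ===== SOURCE B (Python) =====
-- def _get_job_status_text(status: int) -> str:
--     """获取任务状态文本"""
--     texts = ["暂停", "错误", "正在删除", "正在后台处理",
--              "正在打印", "离线", "缺纸", "已打印",
--              "已删除", "被阻止", "用户干预", "重新启动"]
--     # The flag table's keys are the consecutive powers of two 1<<0 .. 1<<11 in
--     # increasing order, so the first matching flag is the lowest set bit of
--     # status: isolate it and index the text list by its bit position.
--     k = (status & -status).bit_length() - 1
--     return texts[k] if 0 <= k < len(texts) else "未知"
-- ===== Notes on version B (the rewrite author's own statement) =====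
-- stated objective: simpler
-- what changed: Replaces the first-match scan over the flag dict with a closed form: isolate the lowest set bit as status & -status, take its bit position via bit_length, and index a plain list of texts by that position (out of range -> default).
import Mathlib
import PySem

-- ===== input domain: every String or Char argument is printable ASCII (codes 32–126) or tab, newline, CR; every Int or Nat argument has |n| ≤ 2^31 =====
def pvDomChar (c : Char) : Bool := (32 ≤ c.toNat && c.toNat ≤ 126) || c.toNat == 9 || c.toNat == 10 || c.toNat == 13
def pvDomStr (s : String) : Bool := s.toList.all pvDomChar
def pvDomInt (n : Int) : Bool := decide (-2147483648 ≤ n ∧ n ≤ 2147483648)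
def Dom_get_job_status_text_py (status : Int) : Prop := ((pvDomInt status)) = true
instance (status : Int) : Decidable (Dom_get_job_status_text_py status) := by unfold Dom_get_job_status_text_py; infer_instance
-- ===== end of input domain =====

-- B replaces the first-match scan over the flag dict by isolating the lowest set bit (status & -status), taking its bit position, and indexing a plain text list; objective: simpler.


-- ===== PORT A =====
-- the dict literal status_map of A
def pvMapA : PySem.Dict Int String := PySem.Dict.ofList
  [(0x00000001, "暂停"), (0x00000002, "错误"), (0x00000004, "正在删除"), (0x00000008, "正在后台处理"),
   (0x00000010, "正在打印"), (0x00000020, "离线"), (0x00000040, "缺纸"), (0x00000080, "已打印"),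
   (0x00000100, "已删除"), (0x00000200, "被阻止"), (0x00000400, "用户干预"), (0x00000800, "重新启动")]

-- 'for flag, text in status_map.items(): if status & flag: return text' / trailing 'return "未知"'
def pvScanA (status : Int) : List (Int × String) → String
  | [] => "未知"
  | (flag, text) :: rest => if PySem.Int.band status flag ≠ 0 then text else pvScanA status rest

def get_job_status_text_py (status : Int) : String :=
  pvScanA status pvMapA.items

-- ===== PORT B =====
-- B's list 'texts' (text of bit position i at index i)
def pvTexts : List String :=
  ["暂停", "错误", "正在删除", "正在后台处理",
   "正在打印", "离线", "缺纸", "已打印",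
   "已删除", "被阻止", "用户干预", "重新启动"]

-- Python int.bit_length on a nonnegative value (hand port, exact: 0 → 0, else ⌊log2 n⌋+1)
def pvBitLen : Nat → Nat
  | 0 => 0
  | n + 1 => pvBitLen ((n + 1) / 2) + 1

-- 'k = (status & -status).bit_length() - 1; return texts[k] if 0 <= k < len(texts) else "未知"'
def get_job_status_text_py_alt (status : Int) : String :=
  let k : Int := (pvBitLen (PySem.Int.band status (-status)).toNat : Int) - 1
  if 0 ≤ k ∧ k < 12 then (PySem.List.pyGet? pvTexts k).getD "未知" else "未知"

-- ===== PRECONDITION & SPEC =====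
def Spec_get_job_status_text_py (status : Int) (out : String) : Prop := out = get_job_status_text_py_alt status
instance (status : Int) (out : String) : Decidable (Spec_get_job_status_text_py status out) := by unfold Spec_get_job_status_text_py; infer_instance

-- ===== CLAIM (what is proved, stated in full; the proofs are below) =====
def Claim_equal_get_job_status_text_py : Prop := ∀ (status : Int), Dom_get_job_status_text_py status → Spec_get_job_status_text_py status (get_job_status_text_py status)

-- ===== LEMMAS AND PROOFS =====

-- Python bit j of x (x & 2^j) for nonnegative x, via Nat.testBit
theorem pv_band_two_pow_of_nonneg (x : Int) (hx : 0 ≤ x) (j : Nat) :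
    PySem.Int.band x (2 ^ j) = if x.toNat.testBit j then 2 ^ j else 0 := by
  have hb : (0:Int) ≤ 2 ^ j := by positivity
  have ht : ((2:Int) ^ j).toNat = 2 ^ j := by
    rw [show ((2:Int) ^ j) = ((2 ^ j : Nat) : Int) by push_cast; ring]
    exact Int.toNat_natCast _
  unfold PySem.Int.band
  rw [if_pos hx, if_pos hb, ht, Nat.and_two_pow]
  by_cases h : x.toNat.testBit j <;> simp [h]

-- Python bit j of negative x: x & 2^j is 2^j iff (|x|-1).testBit j is false
theorem pv_band_two_pow_of_neg (x : Int) (hx : x < 0) (j : Nat) :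
    PySem.Int.band x (2 ^ j) = if (x.natAbs - 1).testBit j then 0 else 2 ^ j := by
  have hb : (0:Int) ≤ 2 ^ j := by positivity
  have ht : ((2:Int) ^ j).toNat = 2 ^ j := by
    rw [show ((2:Int) ^ j) = ((2 ^ j : Nat) : Int) by push_cast; ring]
    exact Int.toNat_natCast _
  have hm : (-x - 1).toNat = x.natAbs - 1 := by omega
  unfold PySem.Int.band
  rw [if_neg (by omega), if_pos hb, ht, hm, Nat.two_pow_and]
  by_cases h : (x.natAbs - 1).testBit j <;> simp [h]

-- a number whose high bit of the successor carries: (n+1) keeps n's bits above 0 when n is even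
theorem pv_succ_testBit_of_even (n t : Nat) (hn : n % 2 = 0) (ht : 1 ≤ t) :
    (n + 1).testBit t = n.testBit t := by
  obtain ⟨t, rfl⟩ := Nat.exists_eq_add_of_le ht
  rw [Nat.add_comm 1 t, Nat.testBit_add_one, Nat.testBit_add_one]
  congr 1
  omega

-- clearing the lowest set bit: m = 2^k * y with y odd has m &&& (m-1) = 2^k * (y-1)
theorem pv_land_pred (k y : Nat) (hy : y % 2 = 1) :
    (2 ^ k * y) &&& (2 ^ k * y - 1) = 2 ^ k * (y - 1) := by
  have h2 : 1 ≤ 2 ^ k := Nat.one_le_two_pow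
  have hsub : 2 ^ k * y - 1 = 2 ^ k * (y - 1) + (2 ^ k - 1) := by
    obtain ⟨y', rfl⟩ : ∃ y', y = y' + 1 := ⟨y - 1, by omega⟩
    rw [Nat.mul_add, Nat.mul_one, Nat.add_sub_cancel]
    omega
  apply Nat.eq_of_testBit_eq
  intro j
  rw [Nat.testBit_land, hsub, Nat.testBit_two_pow_mul_add _ (by omega),
      Nat.testBit_two_pow_mul, Nat.testBit_two_pow_mul]
  by_cases hj : j < k
  · simp [show ¬ j ≥ k by omega]
  · rw [if_neg hj]
    simp only [ge_iff_le, show k ≤ j by omega, decide_true, Bool.true_and]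
    rcases Nat.eq_zero_or_pos (j - k) with h0 | hpos
    · rw [h0, Nat.testBit_zero, Nat.testBit_zero]
      simp [hy, show (y - 1) % 2 = 0 by omega]
    · rw [show y = (y - 1) + 1 by omega, pv_succ_testBit_of_even (y - 1) (j - k) (by omega) hpos]
      simp

-- x & -x isolates the lowest set bit (both signs reduce to |x| - (|x| &&& (|x|-1)))
theorem pv_band_neg_self (x : Int) (k y : Nat) (hy : y % 2 = 1) (hm : x.natAbs = 2 ^ k * y) :
    PySem.Int.band x (-x) = 2 ^ k := by
  have h2 : 1 ≤ 2 ^ k := Nat.one_le_two_pow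
  have hx0 : x ≠ 0 := by
    intro h; rw [h] at hm; simp at hm; omega
  have key : x.natAbs - (x.natAbs &&& (x.natAbs - 1)) = 2 ^ k := by
    rw [hm, pv_land_pred k y hy]
    obtain ⟨y', rfl⟩ : ∃ y', y = y' + 1 := ⟨y - 1, by omega⟩
    rw [Nat.mul_add, Nat.mul_one, Nat.add_sub_cancel]
    omega
  have hcast : ((2 ^ k : Nat) : Int) = 2 ^ k := by push_cast; ring
  rcases lt_or_gt_of_ne hx0 with hneg | hpos
  · unfold PySem.Int.band
    rw [if_neg (by omega), if_pos (by omega)]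
    rw [show (-x).toNat = x.natAbs by omega, show (-x - 1).toNat = x.natAbs - 1 by omega, key, hcast]
  · unfold PySem.Int.band
    rw [if_pos (by omega), if_neg (by omega)]
    rw [show x.toNat = x.natAbs by omega, show (- -x - 1).toNat = x.natAbs - 1 by omega, key, hcast]

-- bits below the lowest set bit are clear: status & 2^j == 0 for j < k
theorem pv_low (x : Int) (k y : Nat) (hy : y % 2 = 1) (hm : x.natAbs = 2 ^ k * y) (hx : x ≠ 0)
    (j : Nat) (hj : j < k) : PySem.Int.band x (2 ^ j) = 0 := by
  have h2 : 1 ≤ 2 ^ k := Nat.one_le_two_pow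
  have hsub : 2 ^ k * y - 1 = 2 ^ k * (y - 1) + (2 ^ k - 1) := by
    obtain ⟨y', rfl⟩ : ∃ y', y = y' + 1 := ⟨y - 1, by omega⟩
    rw [Nat.mul_add, Nat.mul_one, Nat.add_sub_cancel]
    omega
  rcases lt_or_gt_of_ne hx with hneg | hpos
  · rw [pv_band_two_pow_of_neg x hneg j, hm, hsub,
        Nat.testBit_two_pow_mul_add _ (by omega), if_pos hj, Nat.testBit_two_pow_sub_one]
    simp [hj]
  · rw [pv_band_two_pow_of_nonneg x (le_of_lt hpos) j,
        show x.toNat = x.natAbs by omega, hm, Nat.testBit_two_pow_mul]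
    simp [show ¬ j ≥ k by omega]

-- the lowest set bit itself: status & 2^k == 2^k
theorem pv_at (x : Int) (k y : Nat) (hy : y % 2 = 1) (hm : x.natAbs = 2 ^ k * y) (hx : x ≠ 0) :
    PySem.Int.band x (2 ^ k) = 2 ^ k := by
  have h2 : 1 ≤ 2 ^ k := Nat.one_le_two_pow
  have hsub : 2 ^ k * y - 1 = 2 ^ k * (y - 1) + (2 ^ k - 1) := by
    obtain ⟨y', rfl⟩ : ∃ y', y = y' + 1 := ⟨y - 1, by omega⟩
    rw [Nat.mul_add, Nat.mul_one, Nat.add_sub_cancel]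
    omega
  rcases lt_or_gt_of_ne hx with hneg | hpos
  · rw [pv_band_two_pow_of_neg x hneg k, hm, hsub]
    rw [Nat.testBit_two_pow_mul_add _ (by omega)]
    rw [if_neg (lt_irrefl k), Nat.sub_self, Nat.testBit_zero]
    simp [show (y - 1) % 2 = 0 by omega]
  · rw [pv_band_two_pow_of_nonneg x (le_of_lt hpos) k,
        show x.toNat = x.natAbs by omega, hm, Nat.testBit_two_pow_mul]
    simp [Nat.testBit_zero, hy]

theorem pv_itemsA : pvMapA.items = [(1, "暂停"), (2, "错误"), (4, "正在删除"), (8, "正在后台处理"), (16, "正在打印"), (32, "离线"), (64, "缺纸"), (128, "已打印"), (256, "已删除"), (512, "被阻止"), (1024, "用户干预"), (2048, "重新启动")] := by rfl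

-- bit_length of a power of two is its exponent plus one
theorem pv_bitLen_pow (k : Nat) : pvBitLen (2 ^ k) = k + 1 := by
  induction k with
  | zero => norm_num [pvBitLen]
  | succ k ih =>
    have h1 : 1 ≤ 2 ^ (k + 1) := Nat.one_le_two_pow
    have h : 2 ^ (k + 1) = (2 ^ (k + 1) - 1) + 1 := by omega
    rw [h, pvBitLen]
    have harg : (2 ^ (k + 1) - 1 + 1) / 2 = 2 ^ k := by
      have := Nat.pow_succ 2 k
      omega
    rw [harg, ih]

-- evaluation of B on an input whose lowest set bit is 2^k
theorem pv_alt_val (x : Int) (k : Nat) (hb : PySem.Int.band x (-x) = 2 ^ k) :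
    get_job_status_text_py_alt x = if k < 12 then pvTexts.getD k "未知" else "未知" := by
  have ht : ((2:Int) ^ k).toNat = 2 ^ k := by
    rw [show ((2:Int) ^ k) = ((2 ^ k : Nat) : Int) by push_cast; ring]
    exact Int.toNat_natCast _
  unfold get_job_status_text_py_alt
  rw [hb, ht, pv_bitLen_pow]
  have hk' : ((k + 1 : Nat) : Int) - 1 = (k : Int) := by push_cast; ring
  rw [hk']
  by_cases hk : k < 12
  · rw [if_pos ⟨by omega, by exact_mod_cast hk⟩, if_pos hk, PySem.List.pyGet?_natCast]
    interval_cases k <;> rfl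
  · rw [if_neg (by omega), if_neg hk]

theorem pv_main (x : Int) : get_job_status_text_py x = get_job_status_text_py_alt x := by
  by_cases hx : x = 0
  · subst hx
    simp [get_job_status_text_py, get_job_status_text_py_alt, pv_itemsA, pvScanA, PySem.Int.band, pvBitLen]
  · have hm0 : x.natAbs ≠ 0 := by omega
    obtain ⟨k, y, hyo, hm⟩ := Nat.exists_eq_two_pow_mul_odd hm0
    have hy : y % 2 = 1 := Nat.odd_iff.mp hyo
    have hlow : ∀ j, j < k → PySem.Int.band x (2 ^ j) = 0 := fun j hj => pv_low x k y hy hm hx j hj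
    have hat : PySem.Int.band x (2 ^ k) = 2 ^ k := pv_at x k y hy hm hx
    have hb : PySem.Int.band x (-x) = 2 ^ k := pv_band_neg_self x k y hy hm
    rw [pv_alt_val x k hb]
    unfold get_job_status_text_py
    rw [pv_itemsA]
    by_cases hk : k < 12
    · rw [if_pos hk]
      interval_cases k
      · -- k = 0
        norm_num at hat
        simp [pvScanA, pvTexts, hat]
      · -- k = 1
        norm_num at hat
        have e0 : PySem.Int.band x 1 = 0 := by have := hlow 0 (by norm_num); norm_num at this; exact this
        simp [pvScanA, pvTexts, e0, hat]
      · -- k = 2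
        norm_num at hat
        have e0 : PySem.Int.band x 1 = 0 := by have := hlow 0 (by norm_num); norm_num at this; exact this
        have e1 : PySem.Int.band x 2 = 0 := by have := hlow 1 (by norm_num); norm_num at this; exact this
        simp [pvScanA, pvTexts, e0, e1, hat]
      · -- k = 3
        norm_num at hat
        have e0 : PySem.Int.band x 1 = 0 := by have := hlow 0 (by norm_num); norm_num at this; exact this
        have e1 : PySem.Int.band x 2 = 0 := by have := hlow 1 (by norm_num); norm_num at this; exact this
        have e2 : PySem.Int.band x 4 = 0 := by have := hlow 2 (by norm_num); norm_num at this; exact this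
        simp [pvScanA, pvTexts, e0, e1, e2, hat]
      · -- k = 4
        norm_num at hat
        have e0 : PySem.Int.band x 1 = 0 := by have := hlow 0 (by norm_num); norm_num at this; exact this
        have e1 : PySem.Int.band x 2 = 0 := by have := hlow 1 (by norm_num); norm_num at this; exact this
        have e2 : PySem.Int.band x 4 = 0 := by have := hlow 2 (by norm_num); norm_num at this; exact this
        have e3 : PySem.Int.band x 8 = 0 := by have := hlow 3 (by norm_num); norm_num at this; exact this
        simp [pvScanA, pvTexts, e0, e1, e2, e3, hat]
      · -- k = 5
        norm_num at hat
        have e0 : PySem.Int.band x 1 = 0 := by have := hlow 0 (by norm_num); norm_num at this; exact this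
        have e1 : PySem.Int.band x 2 = 0 := by have := hlow 1 (by norm_num); norm_num at this; exact this
        have e2 : PySem.Int.band x 4 = 0 := by have := hlow 2 (by norm_num); norm_num at this; exact this
        have e3 : PySem.Int.band x 8 = 0 := by have := hlow 3 (by norm_num); norm_num at this; exact this
        have e4 : PySem.Int.band x 16 = 0 := by have := hlow 4 (by norm_num); norm_num at this; exact this
        simp [pvScanA, pvTexts, e0, e1, e2, e3, e4, hat]
      · -- k = 6
        norm_num at hat
        have e0 : PySem.Int.band x 1 = 0 := by have := hlow 0 (by norm_num); norm_num at this; exact this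
        have e1 : PySem.Int.band x 2 = 0 := by have := hlow 1 (by norm_num); norm_num at this; exact this
        have e2 : PySem.Int.band x 4 = 0 := by have := hlow 2 (by norm_num); norm_num at this; exact this
        have e3 : PySem.Int.band x 8 = 0 := by have := hlow 3 (by norm_num); norm_num at this; exact this
        have e4 : PySem.Int.band x 16 = 0 := by have := hlow 4 (by norm_num); norm_num at this; exact this
        have e5 : PySem.Int.band x 32 = 0 := by have := hlow 5 (by norm_num); norm_num at this; exact this
        simp [pvScanA, pvTexts, e0, e1, e2, e3, e4, e5, hat]
      · -- k = 7
        norm_num at hat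
        have e0 : PySem.Int.band x 1 = 0 := by have := hlow 0 (by norm_num); norm_num at this; exact this
        have e1 : PySem.Int.band x 2 = 0 := by have := hlow 1 (by norm_num); norm_num at this; exact this
        have e2 : PySem.Int.band x 4 = 0 := by have := hlow 2 (by norm_num); norm_num at this; exact this
        have e3 : PySem.Int.band x 8 = 0 := by have := hlow 3 (by norm_num); norm_num at this; exact this
        have e4 : PySem.Int.band x 16 = 0 := by have := hlow 4 (by norm_num); norm_num at this; exact this
        have e5 : PySem.Int.band x 32 = 0 := by have := hlow 5 (by norm_num); norm_num at this; exact this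
        have e6 : PySem.Int.band x 64 = 0 := by have := hlow 6 (by norm_num); norm_num at this; exact this
        simp [pvScanA, pvTexts, e0, e1, e2, e3, e4, e5, e6, hat]
      · -- k = 8
        norm_num at hat
        have e0 : PySem.Int.band x 1 = 0 := by have := hlow 0 (by norm_num); norm_num at this; exact this
        have e1 : PySem.Int.band x 2 = 0 := by have := hlow 1 (by norm_num); norm_num at this; exact this
        have e2 : PySem.Int.band x 4 = 0 := by have := hlow 2 (by norm_num); norm_num at this; exact this
        have e3 : PySem.Int.band x 8 = 0 := by have := hlow 3 (by norm_num); norm_num at this; exact this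
        have e4 : PySem.Int.band x 16 = 0 := by have := hlow 4 (by norm_num); norm_num at this; exact this
        have e5 : PySem.Int.band x 32 = 0 := by have := hlow 5 (by norm_num); norm_num at this; exact this
        have e6 : PySem.Int.band x 64 = 0 := by have := hlow 6 (by norm_num); norm_num at this; exact this
        have e7 : PySem.Int.band x 128 = 0 := by have := hlow 7 (by norm_num); norm_num at this; exact this
        simp [pvScanA, pvTexts, e0, e1, e2, e3, e4, e5, e6, e7, hat]
      · -- k = 9
        norm_num at hat
        have e0 : PySem.Int.band x 1 = 0 := by have := hlow 0 (by norm_num); norm_num at this; exact this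
        have e1 : PySem.Int.band x 2 = 0 := by have := hlow 1 (by norm_num); norm_num at this; exact this
        have e2 : PySem.Int.band x 4 = 0 := by have := hlow 2 (by norm_num); norm_num at this; exact this
        have e3 : PySem.Int.band x 8 = 0 := by have := hlow 3 (by norm_num); norm_num at this; exact this
        have e4 : PySem.Int.band x 16 = 0 := by have := hlow 4 (by norm_num); norm_num at this; exact this
        have e5 : PySem.Int.band x 32 = 0 := by have := hlow 5 (by norm_num); norm_num at this; exact this
        have e6 : PySem.Int.band x 64 = 0 := by have := hlow 6 (by norm_num); norm_num at this; exact this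
        have e7 : PySem.Int.band x 128 = 0 := by have := hlow 7 (by norm_num); norm_num at this; exact this
        have e8 : PySem.Int.band x 256 = 0 := by have := hlow 8 (by norm_num); norm_num at this; exact this
        simp [pvScanA, pvTexts, e0, e1, e2, e3, e4, e5, e6, e7, e8, hat]
      · -- k = 10
        norm_num at hat
        have e0 : PySem.Int.band x 1 = 0 := by have := hlow 0 (by norm_num); norm_num at this; exact this
        have e1 : PySem.Int.band x 2 = 0 := by have := hlow 1 (by norm_num); norm_num at this; exact this
        have e2 : PySem.Int.band x 4 = 0 := by have := hlow 2 (by norm_num); norm_num at this; exact this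
        have e3 : PySem.Int.band x 8 = 0 := by have := hlow 3 (by norm_num); norm_num at this; exact this
        have e4 : PySem.Int.band x 16 = 0 := by have := hlow 4 (by norm_num); norm_num at this; exact this
        have e5 : PySem.Int.band x 32 = 0 := by have := hlow 5 (by norm_num); norm_num at this; exact this
        have e6 : PySem.Int.band x 64 = 0 := by have := hlow 6 (by norm_num); norm_num at this; exact this
        have e7 : PySem.Int.band x 128 = 0 := by have := hlow 7 (by norm_num); norm_num at this; exact this
        have e8 : PySem.Int.band x 256 = 0 := by have := hlow 8 (by norm_num); norm_num at this; exact this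
        have e9 : PySem.Int.band x 512 = 0 := by have := hlow 9 (by norm_num); norm_num at this; exact this
        simp [pvScanA, pvTexts, e0, e1, e2, e3, e4, e5, e6, e7, e8, e9, hat]
      · -- k = 11
        norm_num at hat
        have e0 : PySem.Int.band x 1 = 0 := by have := hlow 0 (by norm_num); norm_num at this; exact this
        have e1 : PySem.Int.band x 2 = 0 := by have := hlow 1 (by norm_num); norm_num at this; exact this
        have e2 : PySem.Int.band x 4 = 0 := by have := hlow 2 (by norm_num); norm_num at this; exact this
        have e3 : PySem.Int.band x 8 = 0 := by have := hlow 3 (by norm_num); norm_num at this; exact this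
        have e4 : PySem.Int.band x 16 = 0 := by have := hlow 4 (by norm_num); norm_num at this; exact this
        have e5 : PySem.Int.band x 32 = 0 := by have := hlow 5 (by norm_num); norm_num at this; exact this
        have e6 : PySem.Int.band x 64 = 0 := by have := hlow 6 (by norm_num); norm_num at this; exact this
        have e7 : PySem.Int.band x 128 = 0 := by have := hlow 7 (by norm_num); norm_num at this; exact this
        have e8 : PySem.Int.band x 256 = 0 := by have := hlow 8 (by norm_num); norm_num at this; exact this
        have e9 : PySem.Int.band x 512 = 0 := by have := hlow 9 (by norm_num); norm_num at this; exact this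
        have e10 : PySem.Int.band x 1024 = 0 := by have := hlow 10 (by norm_num); norm_num at this; exact this
        simp [pvScanA, pvTexts, e0, e1, e2, e3, e4, e5, e6, e7, e8, e9, e10, hat]
    · rw [if_neg hk]
      have e0 : PySem.Int.band x 1 = 0 := by have := hlow 0 (by omega); norm_num at this; exact this
      have e1 : PySem.Int.band x 2 = 0 := by have := hlow 1 (by omega); norm_num at this; exact this
      have e2 : PySem.Int.band x 4 = 0 := by have := hlow 2 (by omega); norm_num at this; exact this
      have e3 : PySem.Int.band x 8 = 0 := by have := hlow 3 (by omega); norm_num at this; exact this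
      have e4 : PySem.Int.band x 16 = 0 := by have := hlow 4 (by omega); norm_num at this; exact this
      have e5 : PySem.Int.band x 32 = 0 := by have := hlow 5 (by omega); norm_num at this; exact this
      have e6 : PySem.Int.band x 64 = 0 := by have := hlow 6 (by omega); norm_num at this; exact this
      have e7 : PySem.Int.band x 128 = 0 := by have := hlow 7 (by omega); norm_num at this; exact this
      have e8 : PySem.Int.band x 256 = 0 := by have := hlow 8 (by omega); norm_num at this; exact this
      have e9 : PySem.Int.band x 512 = 0 := by have := hlow 9 (by omega); norm_num at this; exact this
      have e10 : PySem.Int.band x 1024 = 0 := by have := hlow 10 (by omega); norm_num at this; exact this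
      have e11 : PySem.Int.band x 2048 = 0 := by have := hlow 11 (by omega); norm_num at this; exact this
      simp [pvScanA, e0, e1, e2, e3, e4, e5, e6, e7, e8, e9, e10, e11]

-- ===== VERDICT (by name: the statement is the Claim_ definition above) =====
theorem get_job_status_text_py_spec : Claim_equal_get_job_status_text_py := by
  intro status _
  exact pv_main status
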